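-- pv_equiv track=rewrite | github.com/anuragkatyal/intalg | scripts/pretzel_validation_specs.py | parallel_signature_compatible
-- ===== SOURCE A (Python) =====
-- def parallel_signature_compatible(
--     left_signature: tuple[tuple[str, int], ...],
--     right_signature: tuple[tuple[str, int], ...],
-- ) -> bool:
--     combined: dict[str, int] = {}
--     for slot, value in left_signature + right_signature:
--         existing = combined.get(slot)
--         if existing is not None and existing != value:
--             return False
--         combined[slot] = value
--
--     for prefix in ("m", "x", "y"):
--         seen_values: dict[int, str] = {}
--         for slot, value in combined.items():
--             if not slot.startswith(prefix):
--                 continue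
--             other_slot = seen_values.get(value)
--             if other_slot is not None and other_slot != slot:
--                 return False
--             seen_values[value] = slot
--     return True
-- ===== SOURCE B (Python) =====
-- def parallel_signature_compatible(
--     left_signature: tuple[tuple[str, int], ...],
--     right_signature: tuple[tuple[str, int], ...],
-- ) -> bool:
--     combined: dict[str, int] = {}
--     for slot, value in tuple(left_signature) + tuple(right_signature):
--         if slot in combined and combined[slot] != value:
--             return False
--         combined[slot] = value
--
--     keyed = [
--         (slot[:1], value)
--         for slot, value in combined.items()
--         if slot[:1] in ("m", "x", "y")
--     ]
--     return len(keyed) == len(set(keyed))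
-- ===== Notes on version B (the rewrite author's own statement) =====
-- stated objective: simpler
-- what changed: A's three separate prefix passes over combined (one per prefix 'm','x','y', each with its own seen_values dict) are replaced by a single comprehension building one list of (first-char, value) pairs for m/x/y slots, compatible iff that list has no duplicates (len == len of its set).
import Mathlib
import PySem

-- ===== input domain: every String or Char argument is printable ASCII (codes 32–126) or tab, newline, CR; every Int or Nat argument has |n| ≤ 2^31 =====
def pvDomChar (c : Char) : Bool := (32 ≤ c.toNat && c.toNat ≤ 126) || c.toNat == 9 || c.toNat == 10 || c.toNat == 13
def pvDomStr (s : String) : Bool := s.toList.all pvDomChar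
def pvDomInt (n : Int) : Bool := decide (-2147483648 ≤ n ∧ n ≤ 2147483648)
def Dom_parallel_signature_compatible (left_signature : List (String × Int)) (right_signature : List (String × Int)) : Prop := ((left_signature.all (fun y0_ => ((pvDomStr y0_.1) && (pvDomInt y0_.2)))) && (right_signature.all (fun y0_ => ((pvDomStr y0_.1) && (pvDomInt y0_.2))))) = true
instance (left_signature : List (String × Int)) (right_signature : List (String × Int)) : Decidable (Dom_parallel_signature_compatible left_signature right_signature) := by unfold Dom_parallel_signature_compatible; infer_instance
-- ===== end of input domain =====

-- B replaces A's three separate prefix rescans of `combined` by one keyed list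
-- (first-char, value) checked for duplicates as a set; objective: simpler.

-- ===== PORT A =====
-- first loop: build `combined`, None = `return False`
def pvALoop1 : List (String × Int) → PySem.Dict String Int → Option (PySem.Dict String Int)
  | [], combined => some combined
  | (slot, value) :: rest, combined =>
    match combined.get? slot with
    | some existing =>
      if existing ≠ value then none
      else pvALoop1 rest (combined.insert slot value)
    | none => pvALoop1 rest (combined.insert slot value)

-- inner loop over combined.items for one prefix, with `seen_values`
def pvAInner (pfx : String) : List (String × Int) → PySem.Dict Int String → Bool
  | [], _ => true
  | (slot, value) :: rest, seen =>
    if ¬ PySem.Str.startswith slot pfx then pvAInner pfx rest seen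
    else
      match seen.get? value with
      | some other =>
        if other ≠ slot then false
        else pvAInner pfx rest (seen.insert value slot)
      | none => pvAInner pfx rest (seen.insert value slot)

def parallel_signature_compatible (left_signature : List (String × Int)) (right_signature : List (String × Int)) : Bool :=
  match pvALoop1 (left_signature ++ right_signature) PySem.Dict.empty with
  | none => false
  | some combined =>
    -- `for prefix in ("m","x","y")` with early `return False`
    pvAInner "m" combined.items PySem.Dict.empty &&
      (pvAInner "x" combined.items PySem.Dict.empty &&
        pvAInner "y" combined.items PySem.Dict.empty)

-- ===== PORT B =====
def pvBLoop1 : List (String × Int) → PySem.Dict String Int → Option (PySem.Dict String Int)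
  | [], combined => some combined
  | (slot, value) :: rest, combined =>
    -- `if slot in combined and combined[slot] != value: return False`
    if (match combined.get? slot with
        | some existing => existing != value
        | none => false) then none
    else pvBLoop1 rest (combined.insert slot value)

-- the comprehension building `keyed`
def pvBKeyed (items : List (String × Int)) : List (String × Int) :=
  items.filterMap (fun sv =>
    if PySem.Str.slice sv.1 none (some 1) ∈ (["m", "x", "y"] : List String)
    then some (PySem.Str.slice sv.1 none (some 1), sv.2)
    else none)

def parallel_signature_compatible_alt (left_signature : List (String × Int)) (right_signature : List (String × Int)) : Bool :=
  match pvBLoop1 (left_signature ++ right_signature) PySem.Dict.empty with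
  | none => false
  | some combined =>
    let keyed := pvBKeyed combined.items
    decide (keyed.length = (PySem.Set.ofList keyed).length)

-- ===== PRECONDITION & SPEC =====
def Spec_parallel_signature_compatible (left_signature : List (String × Int)) (right_signature : List (String × Int)) (out : Bool) : Prop := out = parallel_signature_compatible_alt left_signature right_signature
instance (left_signature : List (String × Int)) (right_signature : List (String × Int)) (out : Bool) : Decidable (Spec_parallel_signature_compatible left_signature right_signature out) := by unfold Spec_parallel_signature_compatible; infer_instance

-- ===== CLAIM (what is proved, stated in full; the proofs are below) =====
def Claim_equal_parallel_signature_compatible : Prop := ∀ (left_signature : List (String × Int)) (right_signature : List (String × Int)), Dom_parallel_signature_compatible left_signature right_signature → Spec_parallel_signature_compatible left_signature right_signature (parallel_signature_compatible left_signature right_signature)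

-- ===== LEMMAS AND PROOFS =====

-- the two first loops agree
theorem loop1_eq (xs : List (String × Int)) (d : PySem.Dict String Int) :
    pvBLoop1 xs d = pvALoop1 xs d := by
  induction xs generalizing d with
  | nil => rfl
  | cons sv rest ih =>
    obtain ⟨slot, value⟩ := sv
    simp only [pvALoop1, pvBLoop1]
    cases h : d.get? slot with
    | none => simpa using ih _
    | some existing =>
      by_cases hv : existing = value <;> simp [hv, ih]

-- keys stay Nodup through the first loop
theorem loop1_nodup_keys (xs : List (String × Int)) (d : PySem.Dict String Int)
    (hd : d.keys.Nodup) (c : PySem.Dict String Int)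
    (h : pvALoop1 xs d = some c) : c.keys.Nodup := by
  induction xs generalizing d with
  | nil =>
    simp only [pvALoop1, Option.some.injEq] at h
    exact h ▸ hd
  | cons sv rest ih =>
    obtain ⟨slot, value⟩ := sv
    simp only [pvALoop1] at h
    cases hg : d.get? slot with
    | none =>
      rw [hg] at h
      exact ih _ (PySem.Dict.nodup_keys_insert _ _ _ hd) h
    | some existing =>
      rw [hg] at h
      by_cases hv : existing = value
      · simp [hv] at h
        exact ih _ (PySem.Dict.nodup_keys_insert _ _ _ hd) h
      · simp [hv] at h

-- ofList as s ++ sublist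
theorem ofList_foldl_sublist {α : Type} [BEq α] [LawfulBEq α] (l s : List α) :
    ∃ t, l.foldl PySem.Set.add s = s ++ t ∧ t.Sublist l := by
  induction l generalizing s with
  | nil => exact ⟨[], by simp⟩
  | cons x rest ih =>
    by_cases hx : PySem.Set.contains s x = true
    · obtain ⟨t, ht, hs⟩ := ih s
      refine ⟨t, ?_, hs.cons _⟩
      rw [List.foldl, PySem.Set.add, if_pos hx]
      exact ht
    · obtain ⟨t, ht, hs⟩ := ih (s ++ [x])
      refine ⟨x :: t, ?_, hs.cons₂ _⟩
      rw [List.foldl, PySem.Set.add, if_neg hx]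
      simpa using ht

theorem length_ofList_eq_iff {α : Type} [BEq α] [LawfulBEq α] (l : List α) :
    (PySem.Set.ofList l).length = l.length ↔ l.Nodup := by
  constructor
  · intro h
    obtain ⟨t, ht, hs⟩ := ofList_foldl_sublist l ([] : List α)
    have : PySem.Set.ofList l = t := by simpa [PySem.Set.ofList_eq_foldl] using ht
    have hlen : t.length = l.length := by rw [← this, h]
    have heq := hs.eq_of_length hlen
    have hnd : t.Nodup := this ▸ PySem.Set.nodup_ofList l
    exact heq ▸ hnd
  · intro h
    rw [PySem.Set.ofList_eq_self_of_nodup _ h]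

-- single-char prefixes: x[:1] equality and startswith coincide
theorem single_prefix_iff (l : List Char) (c : Char) : [c] <+: l ↔ l.take 1 = [c] := by
  cases l with
  | nil => simp
  | cons a t => simp [List.cons_prefix_cons, eq_comm]

theorem pfx_eq_iff (s q : String) (c : Char) (hq : q.toList = [c]) :
    PySem.Str.slice s none (some 1) = q ↔ PySem.Str.startswith s q = true := by
  rw [← String.toList_inj, PySem.Str.toList_slice, PySem.Chars.slice_eq_listSlice]
  rw [show (some (1 : Int)) = some ((1 : Nat) : Int) from rfl, PySem.List.slice_to_natCast]
  rw [PySem.Str.startswith, PySem.Chars.startswith_iff, hq, single_prefix_iff]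

-- Nodup of a keyed filterMap decomposes into per-key Nodups of the values
theorem nodup_filterMap_if {α κ β : Type} [DecidableEq κ] [DecidableEq β]
    (key : α → κ) (val : α → β) (ks : List κ) (l : List α) :
    (l.filterMap (fun a => if key a ∈ ks then some (key a, val a) else none)).Nodup ↔
      ∀ k ∈ ks, ((l.filter (fun a => decide (key a = k))).map val).Nodup := by
  induction l with
  | nil => simp
  | cons a t ih =>
    by_cases hk : key a ∈ ks
    · have hmem : ((key a, val a) ∈
          t.filterMap (fun b => if key b ∈ ks then some (key b, val b) else none)) ↔
          val a ∈ (t.filter (fun b => decide (key b = key a))).map val := by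
        simp only [List.mem_filterMap, List.mem_map, List.mem_filter]
        constructor
        · rintro ⟨b, hb, hif⟩
          split at hif
          · refine ⟨b, ⟨hb, ?_⟩, ?_⟩ <;> simp_all [Prod.ext_iff]
          · simp at hif
        · rintro ⟨b, ⟨hb, hkey⟩, hval⟩
          refine ⟨b, hb, ?_⟩
          simp at hkey
          simp [hkey, hk, hval]
      simp only [List.filterMap_cons, hk, if_pos, List.nodup_cons, hmem, ih]
      constructor
      · rintro ⟨hni, hall⟩
        intro k hkks
        by_cases hke : k = key a
        · subst hke
          simp only [List.filter_cons, decide_true, if_pos, List.map_cons, List.nodup_cons]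
          exact ⟨hni, hall _ hkks⟩
        · have : decide (key a = k) = false := by simp [Ne.symm hke]
          simpa [List.filter_cons, this] using hall _ hkks
      · intro hall
        constructor
        · have := hall _ hk
          simp only [List.filter_cons, decide_true, if_pos, List.map_cons, List.nodup_cons] at this
          exact this.1
        · intro k hkks
          have := hall _ hkks
          by_cases hke : k = key a
          · subst hke
            simp only [List.filter_cons, decide_true, if_pos, List.map_cons, List.nodup_cons] at this
            exact this.2
          · have hf : decide (key a = k) = false := by simp [Ne.symm hke]
            simpa [List.filter_cons, hf] using this
    · have hf : ∀ k ∈ ks, decide (key a = k) = false := by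
        intro k hkks
        simp only [decide_eq_false_iff_not]
        rintro rfl
        exact hk hkks
      simp only [List.filterMap_cons, hk, if_neg, ih, not_false_iff]
      refine forall₂_congr fun k hkks => ?_
      rw [List.filter_cons, hf k hkks]
      simp

-- characterisation of A's inner loop
theorem inner_iff (q : String) (items : List (String × Int)) (seen : PySem.Dict Int String)
    (hnd : (items.map Prod.fst).Nodup)
    (hdisj : ∀ v s, seen.get? v = some s → s ∉ items.map Prod.fst) :
    (pvAInner q items seen = true ↔
      ((items.filter (fun x => PySem.Str.startswith x.1 q)).map Prod.snd).Nodup ∧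
        ∀ v ∈ (items.filter (fun x => PySem.Str.startswith x.1 q)).map Prod.snd,
          seen.get? v = none) := by
  induction items generalizing seen with
  | nil => simp [pvAInner]
  | cons sv rest ih =>
    obtain ⟨slot, value⟩ := sv
    simp only [List.map_cons, List.nodup_cons] at hnd
    by_cases hsw : PySem.Str.startswith slot q = true
    · cases hg : seen.get? value with
      | some other =>
        have hne : other ≠ slot := fun h => (hdisj _ _ hg) (by simp [h])
        have hswC : PySem.Chars.startswith slot.toList q.toList = true := hsw
        have hA : pvAInner q ((slot, value) :: rest) seen = false := by
          simp [pvAInner, hswC, hg, hne]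
        rw [hA]
        simp only [List.filter_cons, hsw, if_pos, List.map_cons]
        constructor
        · intro h; exact absurd h (by simp)
        · rintro ⟨-, hall⟩
          have := hall value (by simp)
          rw [hg] at this
          exact absurd this (by simp)
      | none =>
        have hstep : pvAInner q ((slot, value) :: rest) seen =
            pvAInner q rest (seen.insert value slot) := by
          have hswC : PySem.Chars.startswith slot.toList q.toList = true := hsw
          simp [pvAInner, hswC, hg]
        have hdisj' : ∀ v s, (seen.insert value slot).get? v = some s →
            s ∉ rest.map Prod.fst := by
          intro v s hvs
          rw [PySem.Dict.get?_insert] at hvs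
          split at hvs
          · cases hvs; exact hnd.1
          · have := hdisj _ _ hvs
            rw [List.map_cons] at this
            exact fun hm => this (List.mem_cons_of_mem _ hm)
        rw [hstep, ih (seen.insert value slot) hnd.2 hdisj']
        simp only [List.filter_cons, hsw, decide_true, if_pos, List.map_cons,
          List.nodup_cons, List.mem_cons]
        constructor
        · rintro ⟨hrnd, hall⟩
          have hnotin : value ∉ (rest.filter fun x => PySem.Str.startswith x.1 q).map Prod.snd := by
            intro hmem
            have := hall _ hmem
            rw [PySem.Dict.get?_insert] at this
            simp at this
          refine ⟨⟨hnotin, hrnd⟩, ?_⟩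
          rintro v (rfl | hv)
          · exact hg
          · have := hall _ hv
            rw [PySem.Dict.get?_insert] at this
            split at this
            · exact absurd this (by simp)
            · exact this
        · rintro ⟨⟨hnotin, hrnd⟩, hall⟩
          refine ⟨hrnd, ?_⟩
          intro v hv
          rw [PySem.Dict.get?_insert]
          split
          · rename_i hveq
            exact absurd (hveq ▸ hv) hnotin
          · exact hall v (Or.inr hv)
    · have hswC : PySem.Chars.startswith slot.toList q.toList = false := by
        simpa using hsw
      have hstep : pvAInner q ((slot, value) :: rest) seen = pvAInner q rest seen := by
        simp [pvAInner, hswC]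
      have hdisj' : ∀ v s, seen.get? v = some s → s ∉ rest.map Prod.fst := by
        intro v s hvs
        have := hdisj _ _ hvs
        rw [List.map_cons] at this
        exact fun hm => this (List.mem_cons_of_mem _ hm)
      rw [hstep, ih seen hnd.2 hdisj']
      simp [hswC]

-- ===== VERDICT (by name: the statement is the Claim_ definition above) =====
set_option maxHeartbeats 2000000 in
theorem parallel_signature_compatible_spec : Claim_equal_parallel_signature_compatible := by
  intro l r _
  unfold Spec_parallel_signature_compatible parallel_signature_compatible parallel_signature_compatible_alt
  rw [loop1_eq]
  cases hres : pvALoop1 (l ++ r) PySem.Dict.empty with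
  | none => rfl
  | some combined =>
    have hkeys : (combined.items.map Prod.fst).Nodup :=
      loop1_nodup_keys _ _ PySem.Dict.nodup_keys_empty _ hres
    rw [Bool.eq_iff_iff]
    have hinner : ∀ q : String,
        (pvAInner q combined.items PySem.Dict.empty = true ↔
          ((combined.items.filter (fun x => PySem.Str.startswith x.1 q)).map Prod.snd).Nodup) := by
      intro q
      rw [inner_iff q combined.items PySem.Dict.empty hkeys (by simp [PySem.Dict.get?_empty])]
      simp [PySem.Dict.get?_empty]
    have hkeyed : (pvBKeyed combined.items).Nodup ↔
        ∀ q ∈ (["m", "x", "y"] : List String),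
          ((combined.items.filter (fun x => decide (PySem.Str.slice x.1 none (some 1) = q))).map Prod.snd).Nodup := by
      exact nodup_filterMap_if (α := String × Int) (κ := String) (β := Int)
        (fun sv => PySem.Str.slice sv.1 none (some 1)) Prod.snd ["m", "x", "y"] combined.items
    have hconv : ∀ (q : String) (c : Char), q.toList = [c] →
        (combined.items.filter (fun x => decide (PySem.Str.slice x.1 none (some 1) = q))) =
          (combined.items.filter (fun x => PySem.Str.startswith x.1 q)) := by
      intro q c hq
      apply List.filter_congr
      intro x _
      simp [pfx_eq_iff x.1 q c hq]
    have hlen : (decide ((pvBKeyed combined.items).length =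
        (PySem.Set.ofList (pvBKeyed combined.items)).length) = true) ↔
        (pvBKeyed combined.items).Nodup := by
      rw [decide_eq_true_eq]
      exact ⟨fun h => (length_ofList_eq_iff _).mp h.symm,
        fun h => ((length_ofList_eq_iff _).mpr h).symm⟩
    show _ ↔ (decide ((pvBKeyed combined.items).length =
        (PySem.Set.ofList (pvBKeyed combined.items)).length) = true)
    rw [hlen, hkeyed]
    simp only [Bool.and_eq_true, hinner]
    simp only [List.mem_cons, forall_eq_or_imp, List.not_mem_nil, false_implies]
    rw [hconv "m" 'm' rfl, hconv "x" 'x' rfl, hconv "y" 'y' rfl]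
    tauto
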